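-- pv_equiv track=rewrite | github.com/sbstnppl/rpg | src/schemas/settings.py | validate_point_buy
-- ===== SOURCE A (Python) =====
-- _POINT_COSTS = {
--     8: 0,
--     9: 1,
--     10: 2,
--     11: 3,
--     12: 4,
--     13: 5,
--     14: 7,  # 14 and 15 cost more
--     15: 9,
-- }
--
-- def validate_point_buy(
--     attributes: dict[str, int],
--     total_points: int = 27,
-- ) -> tuple[bool, str | None]:
--     """Validate a point-buy attribute allocation.
--
--     Args:
--         attributes: Dict of attribute_key to value.
--         total_points: Maximum points allowed (default 27).
--
--     Returns:
--         Tuple of (is_valid, error_message or None).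
--     """
--     total_cost = 0
--
--     for key, value in attributes.items():
--         if value < 8:
--             return False, f"Attribute '{key}' is below minimum (8)"
--         if value > 15:
--             return False, f"Attribute '{key}' is above maximum (15)"
--
--         total_cost += _POINT_COSTS[value]
--
--     if total_cost > total_points:
--         return False, f"Total cost ({total_cost}) exceeds budget ({total_points})"
--
--     return True, None
-- ===== SOURCE B (Python) =====
-- _POINT_COSTS = {
--     8: 0,
--     9: 1,
--     10: 2,
--     11: 3,
--     12: 4,
--     13: 5,
--     14: 7,
--     15: 9,
-- }
--
-- def validate_point_buy(attributes, total_points=27):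
--     # Pass 1: range bounds only; first offender in iteration order wins.
--     for key, value in attributes.items():
--         if value < 8:
--             return False, f"Attribute '{key}' is below minimum (8)"
--         if value > 15:
--             return False, f"Attribute '{key}' is above maximum (15)"
--     # Pass 2: closed-form cost, no table lookup: cost(v) = (v-8) + max(0, v-13)
--     total_cost = sum((v - 8) + max(0, v - 13) for v in attributes.values())
--     if total_cost > total_points:
--         return False, f"Total cost ({total_cost}) exceeds budget ({total_points})"
--     return True, None
-- ===== Notes on version B (the rewrite author's own statement) =====
-- stated objective: simpler
-- what changed: B splits A's single combined scan into a range-check pass (first offender wins) and a separate closed-form cost sum (v-8)+max(0,v-13), eliminating the _POINT_COSTS table entirely.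
import Mathlib
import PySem

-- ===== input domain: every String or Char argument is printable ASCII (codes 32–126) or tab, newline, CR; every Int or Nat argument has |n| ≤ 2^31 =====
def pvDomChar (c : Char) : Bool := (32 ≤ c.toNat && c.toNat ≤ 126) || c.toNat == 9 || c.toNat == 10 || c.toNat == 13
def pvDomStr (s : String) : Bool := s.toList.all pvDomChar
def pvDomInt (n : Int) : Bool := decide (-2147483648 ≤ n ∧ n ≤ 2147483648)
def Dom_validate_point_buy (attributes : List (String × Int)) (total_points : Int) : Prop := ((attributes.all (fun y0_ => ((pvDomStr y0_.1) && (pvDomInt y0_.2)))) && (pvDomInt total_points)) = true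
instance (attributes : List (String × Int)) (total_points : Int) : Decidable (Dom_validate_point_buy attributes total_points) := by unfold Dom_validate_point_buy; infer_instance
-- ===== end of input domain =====

-- B splits A's single combined scan into a range-check pass and a separate closed-form
-- cost sum, eliminating the point-cost table (objective: simpler). Return-value equivalence only.

-- message builders (shared f-string shapes, used by both ports)
def pvBelowMsg (k : String) : String := "Attribute '" ++ k ++ "' is below minimum (8)"
def pvAboveMsg (k : String) : String := "Attribute '" ++ k ++ "' is above maximum (15)"
def pvBudgetMsg (tc tp : Int) : String :=
  "Total cost (" ++ PySem.Int.toStr tc ++ ") exceeds budget (" ++ PySem.Int.toStr tp ++ ")"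

-- ===== PORT A =====
def pvPointCosts : PySem.Dict Int Int :=
  PySem.Dict.ofList [(8, 0), (9, 1), (10, 2), (11, 3), (12, 4), (13, 5), (14, 7), (15, 9)]

-- the for-loop of A; _POINT_COSTS[value] is always present after the range checks,
-- so getD's default 0 is unreachable
def pvLoopA (tp : Int) : List (String × Int) → Int → Bool × Option String
  | [], tc => if tc > tp then (false, pvBudgetMsg tc tp) else (true, none)
  | (k, v) :: rest, tc =>
    if v < 8 then (false, pvBelowMsg k)
    else if v > 15 then (false, pvAboveMsg k)
    else pvLoopA tp rest (tc + PySem.Dict.getD pvPointCosts v 0)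

def validate_point_buy (attributes : List (String × Int)) (total_points : Int) : Bool × Option String :=
  pvLoopA total_points attributes 0

-- ===== PORT B =====
-- pass 1: first range violation, if any
def pvFirstViolation : List (String × Int) → Option (Bool × Option String)
  | [] => none
  | (k, v) :: rest =>
    if v < 8 then some (false, pvBelowMsg k)
    else if v > 15 then some (false, pvAboveMsg k)
    else pvFirstViolation rest

-- pass 2: closed-form cost sum
def pvTotalCost (attributes : List (String × Int)) : Int :=
  attributes.foldl (fun acc p => acc + ((p.2 - 8) + max 0 (p.2 - 13))) 0

def validate_point_buy_alt (attributes : List (String × Int)) (total_points : Int) : Bool × Option String :=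
  match pvFirstViolation attributes with
  | some e => e
  | none =>
    let total_cost := pvTotalCost attributes
    if total_cost > total_points then (false, pvBudgetMsg total_cost total_points)
    else (true, none)

-- ===== PRECONDITION & SPEC =====
def Spec_validate_point_buy (attributes : List (String × Int)) (total_points : Int) (out : Bool × Option String) : Prop := out = validate_point_buy_alt attributes total_points
instance (attributes : List (String × Int)) (total_points : Int) (out : Bool × Option String) : Decidable (Spec_validate_point_buy attributes total_points out) := by unfold Spec_validate_point_buy; infer_instance

-- ===== CLAIM (what is proved, stated in full; the proofs are below) =====
def Claim_equal_validate_point_buy : Prop := ∀ (attributes : List (String × Int)) (total_points : Int), Dom_validate_point_buy attributes total_points → Spec_validate_point_buy attributes total_points (validate_point_buy attributes total_points)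

-- ===== LEMMAS AND PROOFS =====

-- the table lookup equals the closed form on the in-range values
lemma pvCost_closed (v : Int) (h8 : ¬ v < 8) (h15 : ¬ v > 15) :
    PySem.Dict.getD pvPointCosts v 0 = (v - 8) + max 0 (v - 13) := by
  interval_cases v <;> rfl

lemma pvTotalCost_cons (k : String) (v : Int) (rest : List (String × Int)) :
    pvTotalCost ((k, v) :: rest) = ((v - 8) + max 0 (v - 13)) + pvTotalCost rest := by
  simp [pvTotalCost, PySem.List.foldl_add]

lemma pvLoop_eq (l : List (String × Int)) : ∀ (tp tc : Int),
    pvLoopA tp l tc =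
      match pvFirstViolation l with
      | some e => e
      | none =>
        if tc + pvTotalCost l > tp then (false, pvBudgetMsg (tc + pvTotalCost l) tp)
        else (true, none) := by
  induction l with
  | nil => intro tp tc; simp [pvLoopA, pvFirstViolation, pvTotalCost]
  | cons p rest ih =>
    intro tp tc
    obtain ⟨k, v⟩ := p
    by_cases h8 : v < 8
    · simp [pvLoopA, pvFirstViolation, h8]
    · by_cases h15 : v > 15
      · simp [pvLoopA, pvFirstViolation, h8, h15]
      · simp only [pvLoopA, pvFirstViolation, h8, h15, if_false, pvTotalCost_cons, ih,
          pvCost_closed v h8 h15]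
        have : tc + ((v - 8) + max 0 (v - 13)) + pvTotalCost rest
            = tc + (((v - 8) + max 0 (v - 13)) + pvTotalCost rest) := by ring
        rw [this]

-- ===== VERDICT (by name: the statement is the Claim_ definition above) =====
theorem validate_point_buy_spec : Claim_equal_validate_point_buy := by
  intro attributes total_points _
  unfold Spec_validate_point_buy validate_point_buy validate_point_buy_alt
  have h := pvLoop_eq attributes total_points 0
  simpa using h
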